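-- pv_equiv track=rewrite | github.com/collinsakenga/codewars_solutions | 5 kyu/Family Tree Ancestors.py | helper2
-- ===== SOURCE A (Python) =====
-- def helper2(num):
--     start=0
--     dict={}
--     while num>0:
--         increment=2**(start+1)
--         for i in range(num):
--             dict[2**start+i*increment]=num+i
--         start+=1
--         num//=2
--     return dict
-- ===== SOURCE B (Python) =====
-- def helper2(num):
--     if num <= 0:
--         return {}
--     d = {}
--     for i in range(num):
--         d[2 * i + 1] = num + i
--     for k, v in helper2(num // 2).items():
--         d[2 * k] = v
--     return d
-- ===== Notes on version B (the rewrite author's own statement) =====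
-- stated objective: simpler
-- what changed: Replaces the iterative while-loop that tracks a level counter and a power-of-two increment with a direct recursion: emit the odd-keyed first level, then double every key of the recursive result for the halved input.
import Mathlib
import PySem

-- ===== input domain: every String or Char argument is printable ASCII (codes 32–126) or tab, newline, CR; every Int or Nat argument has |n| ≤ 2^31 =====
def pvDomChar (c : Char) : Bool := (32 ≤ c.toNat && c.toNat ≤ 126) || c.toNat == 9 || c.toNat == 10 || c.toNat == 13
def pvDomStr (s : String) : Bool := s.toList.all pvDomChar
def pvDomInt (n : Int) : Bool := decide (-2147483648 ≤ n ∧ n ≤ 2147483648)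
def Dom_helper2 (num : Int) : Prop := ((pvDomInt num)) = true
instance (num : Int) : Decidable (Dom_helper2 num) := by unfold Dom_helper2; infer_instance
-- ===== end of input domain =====

-- B replaces A's while-loop with a level counter and power-of-two increment by a direct
-- recursion on num (emit the odd-key level, then double the keys of the recursive dict);
-- objective: simpler.

-- ===== PORT A =====
def helper2Loop (num : Int) (start : Nat) (d : PySem.Dict Int Int) : PySem.Dict Int Int :=
  if _h : num > 0 then
    let increment : Int := 2 ^ (start + 1)
    let d' := (PySem.List.pyRange 0 num 1).foldl
      (fun d i => d.insert ((2 : Int) ^ start + i * increment) (num + i)) d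
    helper2Loop (PySem.Int.floordiv num 2) (start + 1) d'
  else d
termination_by num.toNat
decreasing_by
  rw [PySem.Int.floordiv_eq_ediv_of_pos (by norm_num)]
  omega

def helper2 (num : Int) : List (Int × Int) :=
  (helper2Loop num 0 PySem.Dict.empty).items

-- ===== PORT B =====
def helper2_alt (num : Int) : List (Int × Int) :=
  if h : num ≤ 0 then
    []
  else
    let d := (PySem.List.pyRange 0 num 1).foldl
      (fun d i => d.insert (2 * i + 1) (num + i)) (PySem.Dict.empty : PySem.Dict Int Int)
    ((helper2_alt (PySem.Int.floordiv num 2)).foldl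
      (fun d kv => d.insert (2 * kv.1) kv.2) d).items
termination_by num.toNat
decreasing_by
  rw [PySem.Int.floordiv_eq_ediv_of_pos (by norm_num)]
  omega

-- ===== PRECONDITION & SPEC =====
def Spec_helper2 (num : Int) (out : List (Int × Int)) : Prop := out = helper2_alt num
instance (num : Int) (out : List (Int × Int)) : Decidable (Spec_helper2 num out) := by unfold Spec_helper2; infer_instance

-- ===== CLAIM (what is proved, stated in full; the proofs are below) =====
def Claim_equal_helper2 : Prop := ∀ (num : Int), Dom_helper2 num → Spec_helper2 num (helper2 num)

-- ===== LEMMAS AND PROOFS =====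

-- canonical level list: the common value of both ports
def lv (num : Int) : List (Int × Int) :=
  if h : num ≤ 0 then []
  else
    (PySem.List.pyRange 0 num 1).map (fun i => (2 * i + 1, num + i))
      ++ (lv (PySem.Int.floordiv num 2)).map (fun p => (2 * p.1, p.2))
termination_by num.toNat
decreasing_by
  rw [PySem.Int.floordiv_eq_ediv_of_pos (by norm_num)]
  omega

lemma lv_keys_nodup : ∀ (num : Int), ((lv num).map (·.1)).Nodup := by
  intro num
  induction num using lv.induct with
  | case1 n h => simp [lv, h]
  | case2 n h ih =>
    rw [lv, dif_neg h, List.map_append, List.nodup_append]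
    refine ⟨?_, ?_, ?_⟩
    · rw [List.map_map]
      refine (PySem.List.nodup_pyRange_one 0 n).map ?_
      intro a b hab
      simp only [Function.comp] at hab
      omega
    · rw [List.map_map]
      have hinj : Function.Injective (fun k : Int => 2 * k) := by
        intro a b hab; dsimp at hab; omega
      have := ih.map hinj
      rw [List.map_map] at this
      convert this using 2
    · intro a ha b hb
      simp only [List.map_map, List.mem_map, Function.comp] at ha hb
      obtain ⟨i, _, rfl⟩ := ha
      obtain ⟨q, _, rfl⟩ := hb
      omega

-- A's loop appends the scaled level list, provided no key of d is divisible by 2^start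
lemma helper2Loop_items : ∀ (num : Int) (start : Nat) (d : PySem.Dict Int Int),
    (∀ k ∈ d.keys, ¬ ((2 : Int) ^ start ∣ k)) →
    (helper2Loop num start d).items
      = d.items ++ (lv num).map (fun p => ((2 : Int) ^ start * p.1, p.2)) := by
  intro num
  induction num using lv.induct with
  | case1 n h =>
    intro start d _
    rw [helper2Loop, dif_neg (by omega), lv, dif_pos h]
    simp
  | case2 n h ih =>
    intro start d hd
    have hpos : n > 0 := by omega
    rw [helper2Loop, dif_pos hpos]
    have hfresh : ∀ i ∈ PySem.List.pyRange 0 n 1,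
        d.contains ((2 : Int) ^ start + i * 2 ^ (start + 1)) = false := by
      intro i _
      rw [PySem.Dict.contains_eq_decide_mem_keys, decide_eq_false_iff_not]
      intro hmem
      exact hd _ hmem ⟨1 + i * 2, by ring⟩
    have hnd : ((PySem.List.pyRange 0 n 1).map
        (fun i => (2 : Int) ^ start + i * 2 ^ (start + 1))).Nodup := by
      refine (PySem.List.nodup_pyRange_one 0 n).map ?_
      intro a b hab
      have h2 : (0 : Int) < 2 ^ (start + 1) := by positivity
      nlinarith [hab]
    have hitems := PySem.Dict.items_foldl_insert_fresh
      (l := PySem.List.pyRange 0 n 1)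
      (k := fun i => (2 : Int) ^ start + i * 2 ^ (start + 1))
      (v := fun i => n + i) (d := d) hfresh hnd
    set d' := (PySem.List.pyRange 0 n 1).foldl
      (fun d i => d.insert ((2 : Int) ^ start + i * 2 ^ (start + 1)) (n + i)) d with hd'
    have hd'keys : ∀ k ∈ d'.keys, ¬ ((2 : Int) ^ (start + 1) ∣ k) := by
      intro k hk
      have : k ∈ d'.items.map (·.1) := hk
      rw [hitems, List.map_append, List.mem_append] at this
      rcases this with h1 | h1
      · intro hdvd
        exact hd k h1 (dvd_trans ⟨2, by ring⟩ hdvd)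
      · rw [List.map_map, List.mem_map] at h1
        obtain ⟨i, _, rfl⟩ := h1
        rintro ⟨c, hc⟩
        simp only [Function.comp] at hc
        have h2 : (2 : Int) ^ start ≠ 0 := by positivity
        have he : (2 : Int) ^ start + i * 2 ^ (start + 1) = 2 ^ start * (1 + 2 * i) := by ring
        have he2 : (2 : Int) ^ (start + 1) * c = 2 ^ start * (2 * c) := by ring
        rw [he, he2] at hc
        have := mul_left_cancel₀ h2 hc
        omega
    rw [ih (start + 1) d' hd'keys, hitems, List.append_assoc]
    have hlv : lv n = (PySem.List.pyRange 0 n 1).map (fun i => (2 * i + 1, n + i))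
        ++ (lv (PySem.Int.floordiv n 2)).map (fun p => (2 * p.1, p.2)) := by
      rw [lv, dif_neg h]
    rw [hlv, List.map_append, List.map_map, List.map_map]
    congr 1
    congr 1
    · apply List.map_congr_left
      intro i _
      simp only [Function.comp, Prod.ext_iff]
      exact ⟨by ring, trivial⟩
    · apply List.map_congr_left
      intro p _
      simp only [Function.comp, Prod.ext_iff]
      exact ⟨by ring, trivial⟩

lemma helper2_eq_lv (num : Int) : helper2 num = lv num := by
  have hempty : (PySem.Dict.empty : PySem.Dict Int Int).items = [] := rfl
  rw [helper2, helper2Loop_items num 0 PySem.Dict.empty (by simp [PySem.Dict.keys_empty]),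
    hempty, List.nil_append]
  have hid : (fun p : Int × Int => ((2 : Int) ^ 0 * p.1, p.2)) = id := by
    funext p; simp
  rw [hid, List.map_id]

lemma helper2_alt_eq_lv : ∀ (num : Int), helper2_alt num = lv num := by
  intro num
  induction num using lv.induct with
  | case1 n h => rw [helper2_alt, dif_pos h, lv, dif_pos h]
  | case2 n h ih =>
    rw [helper2_alt, dif_neg h, lv, dif_neg h]
    have hpos : n > 0 := by omega
    -- level-0 fold: fresh distinct odd keys into the empty dict
    have hnd0 : ((PySem.List.pyRange 0 n 1).map (fun i => 2 * i + 1)).Nodup := by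
      refine (PySem.List.nodup_pyRange_one 0 n).map ?_
      intro a b hab
      dsimp at hab
      omega
    have hempty : (PySem.Dict.empty : PySem.Dict Int Int).items = [] := rfl
    have h0 := PySem.Dict.items_foldl_insert_fresh
      (l := PySem.List.pyRange 0 n 1) (k := fun i => 2 * i + 1)
      (v := fun i => n + i) (d := (PySem.Dict.empty : PySem.Dict Int Int))
      (by intro a _; simp [PySem.Dict.contains_empty]) hnd0
    set d0 := (PySem.List.pyRange 0 n 1).foldl
      (fun d i => d.insert (2 * i + 1) (n + i)) (PySem.Dict.empty : PySem.Dict Int Int) with hd0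
    -- second fold: doubled recursive keys are even, level-0 keys odd, hence fresh
    have hfresh2 : ∀ p ∈ helper2_alt (PySem.Int.floordiv n 2), d0.contains (2 * p.1) = false := by
      intro p hp
      rw [PySem.Dict.contains_eq_decide_mem_keys, decide_eq_false_iff_not]
      intro hmem
      have : 2 * p.1 ∈ d0.items.map (·.1) := hmem
      rw [h0, hempty, List.nil_append, List.map_map, List.mem_map] at this
      obtain ⟨i, _, hi⟩ := this
      simp only [Function.comp] at hi
      omega
    have hnd2 : ((helper2_alt (PySem.Int.floordiv n 2)).map (fun p => 2 * p.1)).Nodup := by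
      rw [ih]
      have := (lv_keys_nodup (PySem.Int.floordiv n 2)).map
        (f := fun k : Int => 2 * k) (fun a b hab => by dsimp at hab; omega)
      rw [List.map_map] at this
      convert this using 2
    have h2 := PySem.Dict.items_foldl_insert_fresh
      (l := helper2_alt (PySem.Int.floordiv n 2)) (k := fun p => 2 * p.1)
      (v := fun p => p.2) (d := d0) hfresh2 hnd2
    rw [h2, h0, hempty, List.nil_append, ih]

-- ===== VERDICT (by name: the statement is the Claim_ definition above) =====
theorem helper2_spec : Claim_equal_helper2 := by
  intro num _
  unfold Spec_helper2
  rw [helper2_eq_lv, helper2_alt_eq_lv]
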